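-- pv_equiv track=rewrite | github.com/VShah2312/Python_Portfolio | Python + DSA Course/Assignments/Week 6/Assignment-5/Q1.py | oddCharacters
-- ===== SOURCE A (Python) =====
-- from typing import List
--
-- def oddCharacters(string: str) -> List[str]:
--     characters_count = {}
--     for ch in string:
--         characters_count[ch] = characters_count.get(ch, 0) + 1
--     result = []
--     for char, count in characters_count.items():
--         if count % 2 == 1:
--             result.append(char)
--     return result
-- ===== SOURCE B (Python) =====
-- def oddCharacters(string):
--     # Toggle a parity set: a char is in `odd` iff it has occurred an odd number of times so far.
--     odd = set()
--     for ch in string: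
--         if ch in odd:
--             odd.discard(ch)
--         else:
--             odd.add(ch)
--     # Emit odd-parity chars in first-occurrence order by rescanning the string.
--     result = []
--     seen = set()
--     for ch in string:
--         if ch not in seen:
--             seen.add(ch)
--             if ch in odd:
--                 result.append(ch)
--     return result
-- ===== Notes on version B (the rewrite author's own statement) =====
-- stated objective: alternative
-- what changed: Replaces the character-count dictionary and the items() filter by a parity toggle set (membership flipped on each occurrence) plus a second pass over the string that emits odd-parity characters in first-occurrence order.
import Mathlib
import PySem

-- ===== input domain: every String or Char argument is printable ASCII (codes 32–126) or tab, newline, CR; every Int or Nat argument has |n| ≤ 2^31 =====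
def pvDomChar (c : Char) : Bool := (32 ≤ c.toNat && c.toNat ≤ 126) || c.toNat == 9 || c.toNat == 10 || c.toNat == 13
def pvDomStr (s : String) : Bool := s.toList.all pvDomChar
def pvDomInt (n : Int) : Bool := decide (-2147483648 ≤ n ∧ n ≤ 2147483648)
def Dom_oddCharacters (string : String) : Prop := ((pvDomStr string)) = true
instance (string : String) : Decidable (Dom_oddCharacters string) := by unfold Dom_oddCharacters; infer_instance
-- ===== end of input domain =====

-- B replaces A's count dictionary + items() filter by a parity toggle set and a second
-- pass over the string (first-occurrence order); alternative decomposition, same cost.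

-- ===== PORT A =====
def oddCharacters (string : String) : List String :=
  let counts := string.toList.foldl
    (fun d ch => d.insert ch (d.getD ch 0 + 1)) (PySem.Dict.empty : PySem.Dict Char Int)
  counts.items.foldl
    (fun result p => if PySem.Int.mod p.2 2 == 1 then result ++ [String.ofList [p.1]] else result) []

-- ===== PORT B =====
def oddCharacters_alt (string : String) : List String :=
  let odd := string.toList.foldl
    (fun s ch => if PySem.Set.contains s ch then PySem.Set.discard s ch else PySem.Set.add s ch)
    (PySem.Set.empty : PySem.Set Char)
  (string.toList.foldl
    (fun (st : List String × PySem.Set Char) ch =>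
      if PySem.Set.contains st.2 ch then st
      else ((if PySem.Set.contains odd ch then st.1 ++ [String.ofList [ch]] else st.1),
            PySem.Set.add st.2 ch))
    ([], (PySem.Set.empty : PySem.Set Char))).1

-- ===== PRECONDITION & SPEC =====
def Spec_oddCharacters (string : String) (out : List String) : Prop := out = oddCharacters_alt string
instance (string : String) (out : List String) : Decidable (Spec_oddCharacters string out) := by unfold Spec_oddCharacters; infer_instance

-- ===== CLAIM (what is proved, stated in full; the proofs are below) =====
def Claim_equal_oddCharacters : Prop := ∀ (string : String), Dom_oddCharacters string → Spec_oddCharacters string (oddCharacters string)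

-- ===== LEMMAS AND PROOFS =====

-- membership in B's parity toggle loop: final membership = initial membership XOR odd count
lemma toggle_mem (l : List Char) : ∀ (s : PySem.Set Char) (c : Char),
    (c ∈ l.foldl (fun s ch => if PySem.Set.contains s ch then PySem.Set.discard s ch else PySem.Set.add s ch) s
      ↔ (c ∈ s ↔ l.count c % 2 = 0)) := by
  induction l with
  | nil => intro s c; simp
  | cons x l ih =>
    intro s c
    simp only [List.foldl_cons, ih]
    by_cases hcx : c = x
    · subst hcx
      by_cases hs : c ∈ s <;>
        rcases Nat.mod_two_eq_zero_or_one (l.count c) with hp | hp <;>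
        simp [hs, PySem.Set.mem_discard, PySem.Set.mem_add, List.count_cons_self, hp,
          Nat.add_mod] <;> omega
    · have hxc : ¬ x = c := fun h => hcx h.symm
      have hcount : (x :: l).count c = l.count c := by simp [List.count_cons, hxc]
      rw [hcount]
      by_cases hs : x ∈ s <;>
        simp [hs, PySem.Set.mem_discard, PySem.Set.mem_add] <;> tauto

-- B's second pass: output = odd-parity chars in first-occurrence order, seen = set(l)
lemma pass2 (odd : PySem.Set Char) (l : List Char) :
    (l.foldl
      (fun (st : List String × PySem.Set Char) ch =>
        if PySem.Set.contains st.2 ch then st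
        else ((if PySem.Set.contains odd ch then st.1 ++ [String.ofList [ch]] else st.1),
              PySem.Set.add st.2 ch))
      ([], (PySem.Set.empty : PySem.Set Char)))
    = (((PySem.Set.ofList l).filter (fun c => PySem.Set.contains odd c)).map (fun c => String.ofList [c]),
       PySem.Set.ofList l) := by
  induction l using List.reverseRecOn with
  | nil => rfl
  | append_singleton l x ih =>
    rw [List.foldl_append, ih, List.foldl_cons, List.foldl_nil,
      PySem.Set.ofList_append_singleton]
    by_cases hx : x ∈ l
    · have hc : PySem.Set.contains (PySem.Set.ofList l) x = true :=
        (PySem.Set.contains_iff _ _).mpr ((PySem.Set.mem_ofList _ _).mpr hx)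
      rw [if_pos hc]
      have hadd : PySem.Set.add (PySem.Set.ofList l) x = PySem.Set.ofList l := by
        simp [PySem.Set.add, hc, hx]
      rw [hadd]
    · have hc : PySem.Set.contains (PySem.Set.ofList l) x = false := by
        rw [← Bool.not_eq_true]
        exact fun h => hx ((PySem.Set.mem_ofList _ _).mp ((PySem.Set.contains_iff _ _).mp h))
      rw [if_neg (by simp [hx])]
      have hadd : PySem.Set.add (PySem.Set.ofList l) x = PySem.Set.ofList l ++ [x] := by
        simp [PySem.Set.add, hc]
        exact hx
      rw [hadd, List.filter_append, List.map_append]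
      by_cases ho : PySem.Set.contains odd x
      · rw [if_pos ho]
        simp [(PySem.Set.contains_iff _ _).mp ho]
      · rw [if_neg ho]
        have hno : x ∉ odd := fun h => ho ((PySem.Set.contains_iff _ _).mpr h)
        simp [hno]

-- ===== VERDICT =====
theorem oddCharacters_spec : Claim_equal_oddCharacters := by
  intro string _
  unfold Spec_oddCharacters oddCharacters oddCharacters_alt
  dsimp only
  rw [pass2]
  rw [PySem.Dict.foldl_insert_getD_add_one_eq_counter, PySem.Dict.items_counter,
    PySem.List.foldl_append_if]
  rw [List.nil_append, List.filter_map, List.map_map]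
  congr 1
  apply List.filter_congr
  intro c _
  set l := string.toList with hl
  have hmem : (c ∈ l.foldl (fun s ch => if PySem.Set.contains s ch then PySem.Set.discard s ch else PySem.Set.add s ch)
      (PySem.Set.empty : PySem.Set Char)) ↔ ¬ l.count c % 2 = 0 := by
    have h := toggle_mem l (PySem.Set.empty : PySem.Set Char) c
    simpa [PySem.Set.empty] using h
  have hcont : ∀ (F : PySem.Set Char), (c ∈ F ↔ ¬ l.count c % 2 = 0) →
      F.contains c = decide (¬ (l.count c % 2 = 0)) := by
    intro F hF
    by_cases hin : c ∈ F
    · rw [(PySem.Set.contains_iff F c).mpr hin]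
      simp [hF.mp hin]
    · have hfalse : F.contains c = false := by
        rw [← Bool.not_eq_true]
        exact fun h => hin ((PySem.Set.contains_iff F c).mp h)
      have hcnt : l.count c % 2 = 0 := by
        by_contra hne
        exact hin (hF.mpr hne)
      rw [hfalse]
      simp [hcnt]
  rw [Function.comp_apply, hcont _ hmem]
  have hmod : PySem.Int.mod ((l.count c : Int)) 2 = ((l.count c % 2 : Nat) : Int) := by
    rw [PySem.Int.mod_eq_emod_of_pos (by norm_num)]
    omega
  rw [hmod]
  rcases Nat.mod_two_eq_zero_or_one (l.count c) with h | h <;> simp [h]
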